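-- pv_equiv track=rewrite | github.com/uelkerd/SAMO--DL | fix_syntax_errors.py | fix_unterminated_strings
-- ===== SOURCE A (Python) =====
-- def fix_unterminated_strings(content):
--     """Fix basic unterminated string patterns"""
--     lines = content.split("\n")
--     fixed_lines = []
--
--     for i, line in enumerate(lines):
--         # Look for unterminated strings that end with a period at end of line
--         if line.strip().endswith(".") and ('"' in line or "'" in line):
--             # Check if this looks like a broken string literal
--             if '= f"' in line and line.count('"') == 1:
--                 # This might be an f-string that got broken
--                 next_line_idx = i + 1
--                 if next_line_idx < len(lines) and lines[next_line_idx].strip().endswith('"'):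
--                     # Merge the lines
--                     merged = line.rstrip(".") + lines[next_line_idx].strip()
--                     fixed_lines.append(merged)
--                     lines[next_line_idx] = ""  # Mark for skipping
--                     continue
--
--         if line:  # Only add non-empty lines (skip marked lines)
--             fixed_lines.append(line)
--
--     return "\n".join(fixed_lines)
-- ===== SOURCE B (Python) =====
-- def fix_unterminated_strings(content):
--     """Fix basic unterminated string patterns (right-to-left rewrite).
--
--     Scans the lines BACKWARDS with a fold: `prev` holds the original line to
--     the right, `out` the processed tail (in reversed order).  A line that
--     matches the merge predicate against `prev` overwrites the already-emitted
--     `prev` (out[-1]) with the merged line.  This is correct because a line whose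
--     stripped text ends with '.' cannot also end with '"', so merges never chain:
--     whenever the predicate fires, `prev` was necessarily emitted unmerged.
--     """
--     def mergeable(line, nxt):
--         return (line.strip().endswith(".") and ('"' in line or "'" in line)
--                 and '= f"' in line and line.count('"') == 1
--                 and nxt.strip().endswith('"'))
--
--     out = []
--     prev = None
--     for line in reversed(content.split("\n")):
--         if prev is not None and mergeable(line, prev):
--             out[-1] = line.rstrip(".") + prev.strip()
--         elif line:
--             out.append(line)
--         prev = line
--     return "\n".join(reversed(out))
-- ===== Notes on version B (the rewrite author's own statement) =====
-- stated objective: alternative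
-- what changed: B traverses the lines in REVERSE with a fold (prev = the original line to the right): a merge overwrites the already-emitted continuation line out[-1] instead of consuming the next line, replacing A's forward loop that mutates the list and later filters the empty skip-markers; correctness of the backward pass rests on the fact that merges cannot chain (a stripped line cannot end with both '.' and a double quote), which the Lean proof establishes.
import Mathlib
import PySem

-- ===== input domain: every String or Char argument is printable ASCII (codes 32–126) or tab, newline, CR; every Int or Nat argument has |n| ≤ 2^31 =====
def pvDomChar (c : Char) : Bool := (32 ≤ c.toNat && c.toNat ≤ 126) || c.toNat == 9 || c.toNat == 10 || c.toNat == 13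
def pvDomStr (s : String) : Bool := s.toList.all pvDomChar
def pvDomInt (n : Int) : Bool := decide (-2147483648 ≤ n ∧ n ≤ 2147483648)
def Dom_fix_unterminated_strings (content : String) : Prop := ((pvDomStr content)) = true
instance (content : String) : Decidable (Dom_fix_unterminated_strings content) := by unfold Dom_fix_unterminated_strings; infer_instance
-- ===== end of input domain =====

-- B scans the lines BACKWARDS with a fold (prev = original line to the right); a merge
-- overwrites the already-emitted continuation line instead of consuming the next one,
-- which is correct because merges can never chain (a stripped line cannot end with both
-- '.' and '"').  A's forward loop mutates the list and filters the "" markers instead.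

-- exact port of Python str.rstrip("."): removes all trailing '.' characters
def pyRstripDots (s : String) : String :=
  String.ofList ((s.toList.reverse.dropWhile (fun c => c == '.')).reverse)

-- ===== PORT A =====
-- A's for-loop over `lines` with the in-place mutation lines[i+1] = "" after a merge,
-- rendered as structural recursion on the remaining lines ("" :: rest' is the mutation);
-- the merge branch is Python's `continue`, the fall-through is `if line:`.
def fixLoopA : List String → List String → List String
  | [], acc => acc.reverse
  | [line], acc =>
      if line ≠ "" then fixLoopA [] (line :: acc) else fixLoopA [] acc
  | line :: next :: rest', acc =>
      if PySem.Str.endswith (PySem.Str.strip line) "." &&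
         (PySem.Str.isIn "\"" line || PySem.Str.isIn "'" line) &&
         PySem.Str.isIn "= f\"" line &&
         (PySem.Str.count line "\"" == 1) &&
         PySem.Str.endswith (PySem.Str.strip next) "\"" then
        fixLoopA ("" :: rest') ((pyRstripDots line ++ PySem.Str.strip next) :: acc)
      else if line ≠ "" then fixLoopA (next :: rest') (line :: acc)
      else fixLoopA (next :: rest') acc
termination_by l _ => l.length

def fix_unterminated_strings (content : String) : String :=
  PySem.Str.join "\n" (fixLoopA ((PySem.Str.split? content "\n").getD []) [])
  -- sep "\n" ≠ "" so split? is always `some`; getD [] only unwraps it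

-- ===== PORT B =====
-- Source B's helper `mergeable(line, nxt)`
def mergeableB (line nxt : String) : Bool :=
  PySem.Str.endswith (PySem.Str.strip line) "." &&
  (PySem.Str.isIn "\"" line || PySem.Str.isIn "'" line) &&
  PySem.Str.isIn "= f\"" line &&
  (PySem.Str.count line "\"" == 1) &&
  PySem.Str.endswith (PySem.Str.strip nxt) "\""

-- Source B's loop body; `out` stores Python's `out` list REVERSED (Python appends at the end
-- and finally reverses; here cons at the head, so the final reversal is the identity).
-- Python's `out[-1] = v` is head replacement: `v :: out.tail` (Python would raise
-- IndexError on an empty `out`, which is unreachable: the predicate forces `prev` to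
-- have been emitted — proved below as part of the equivalence).
def stepB (st : List String × Option String) (line : String) : List String × Option String :=
  match st with
  | (out, prev) =>
    match prev with
    | some p =>
        if mergeableB line p then ((pyRstripDots line ++ PySem.Str.strip p) :: out.tail, some line)
        else if line ≠ "" then (line :: out, some line)
        else (out, some line)
    | none =>
        if line ≠ "" then (line :: out, some line) else (out, some line)

def fix_unterminated_strings_alt (content : String) : String :=
  PySem.Str.join "\n"
    ((((PySem.Str.split? content "\n").getD []).reverse.foldl stepB ([], none)).1)

-- ===== PRECONDITION & SPEC =====
def Spec_fix_unterminated_strings (content : String) (out : String) : Prop := out = fix_unterminated_strings_alt content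
instance (content : String) (out : String) : Decidable (Spec_fix_unterminated_strings content out) := by unfold Spec_fix_unterminated_strings; infer_instance

-- ===== CLAIM (what is proved, stated in full; the proofs are below) =====
def Claim_equal_fix_unterminated_strings : Prop := ∀ (content : String), Dom_fix_unterminated_strings content → Spec_fix_unterminated_strings content (fix_unterminated_strings content)

-- ===== LEMMAS AND PROOFS =====

-- an empty line never merges and is never emitted: one step of A's loop just drops it
theorem fixLoopA_empty_cons (rest : List String) (acc : List String) :
    fixLoopA ("" :: rest) acc = fixLoopA rest acc := by
  have hc : PySem.Chars.endswith (PySem.Chars.strip ([] : List Char)) ['.'] = false := by decide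
  cases rest with
  | nil => simp [fixLoopA]
  | cons x xs => simp [fixLoopA, hc]

-- the accumulator only prepends (reversed): fixLoopA s acc = acc.reverse ++ fixLoopA s []
theorem fixLoopA_acc : ∀ (k : Nat) (s acc : List String), s.length ≤ k →
    fixLoopA s acc = acc.reverse ++ fixLoopA s [] := by
  intro k
  induction k with
  | zero =>
      intro s acc h
      have : s = [] := List.eq_nil_of_length_eq_zero (by omega)
      subst this; simp [fixLoopA]
  | succ k ih =>
      intro s acc h
      match s with
      | [] => simp [fixLoopA]
      | [line] =>
          by_cases hl : line = "" <;> simp [fixLoopA, hl]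
      | line :: next :: rest' =>
          simp only [fixLoopA]
          split_ifs with h1 h2
          · rw [ih ("" :: rest') _ (by simp at h ⊢; omega),
                ih ("" :: rest') [_] (by simp at h ⊢; omega)]
            simp
          · rw [ih (next :: rest') _ (by simp at h ⊢; omega),
                ih (next :: rest') [line] (by simp at h ⊢; omega)]
            simp
          · rw [ih (next :: rest') acc (by simp at h ⊢; omega)]

-- a stripped line ending with '"' does not end with '.' and is nonempty
theorem endswith_quote_facts (p : String) :
    PySem.Str.endswith (PySem.Str.strip p) "\"" = true →
    PySem.Str.endswith (PySem.Str.strip p) "." = false ∧ p ≠ "" := by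
  intro hq
  constructor
  · by_contra hdot
    have hd : PySem.Str.endswith (PySem.Str.strip p) "." = true := by
      cases h : PySem.Str.endswith (PySem.Str.strip p) "." with
      | false => exact absurd h hdot
      | true => rfl
    have h1 : ['"'] <:+ (PySem.Str.strip p).toList := by
      have := PySem.Chars.endswith_iff ((PySem.Str.strip p).toList) ['"']
      simpa using this.mp (by simpa using hq)
    have h2 : ['.'] <:+ (PySem.Str.strip p).toList := by
      have := PySem.Chars.endswith_iff ((PySem.Str.strip p).toList) ['.']
      simpa using this.mp (by simpa using hd)
    obtain ⟨t1, e1⟩ := h1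
    obtain ⟨t2, e2⟩ := h2
    have g1 : ((PySem.Str.strip p).toList).getLast? = some '"' := by
      rw [← e1]; simp
    have g2 : ((PySem.Str.strip p).toList).getLast? = some '.' := by
      rw [← e2]; simp
    rw [g1] at g2; simp at g2
  · intro hp
    subst hp
    have hf : PySem.Str.endswith (PySem.Str.strip "") "\"" = false := by decide
    rw [hf] at hq; exact absurd hq (by decide)

-- if the merge predicate fires against p, then A keeps p unchanged at the head
theorem fixLoopA_keep_head (l p : String) (u : List String) (h : mergeableB l p = true) :
    fixLoopA (p :: u) [] = p :: fixLoopA u [] := by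
  have hq : PySem.Str.endswith (PySem.Str.strip p) "\"" = true := by
    unfold mergeableB at h
    exact (Bool.and_eq_true_iff.mp h).2
  obtain ⟨hdot, hne⟩ := endswith_quote_facts p hq
  cases u with
  | nil => simp [fixLoopA, hne]
  | cons q v =>
      simp only [fixLoopA, hdot, Bool.false_and, Bool.false_eq_true, if_false, ne_eq, hne,
        not_false_iff, if_true]
      exact fixLoopA_acc (q :: v).length (q :: v) [p] le_rfl

-- B's backwards fold computes A's loop result, with prev = the first remaining line
theorem foldB_eq_fixLoopA : ∀ (s : List String),
    s.reverse.foldl stepB ([], none) = (fixLoopA s [], s.head?) := by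
  intro s
  induction s with
  | nil => simp [fixLoopA]
  | cons l t ih =>
      rw [List.reverse_cons, List.foldl_append, ih]
      cases t with
      | nil =>
          by_cases hl : l = "" <;> simp [stepB, fixLoopA, hl]
      | cons p u =>
          simp only [List.foldl_cons, List.foldl_nil, List.head?_cons, stepB]
          by_cases hm : mergeableB l p = true
          · rw [fixLoopA_keep_head l p u hm]
            have hcond : (PySem.Str.endswith (PySem.Str.strip l) "." &&
               (PySem.Str.isIn "\"" l || PySem.Str.isIn "'" l) &&
               PySem.Str.isIn "= f\"" l &&
               (PySem.Str.count l "\"" == 1) &&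
               PySem.Str.endswith (PySem.Str.strip p) "\"") = true := by
              unfold mergeableB at hm; exact hm
            simp only [fixLoopA, hcond, if_true, hm, List.tail_cons]
            rw [fixLoopA_empty_cons, fixLoopA_acc u.length u [_] le_rfl]
            simp
          · have hcond : (PySem.Str.endswith (PySem.Str.strip l) "." &&
               (PySem.Str.isIn "\"" l || PySem.Str.isIn "'" l) &&
               PySem.Str.isIn "= f\"" l &&
               (PySem.Str.count l "\"" == 1) &&
               PySem.Str.endswith (PySem.Str.strip p) "\"") = false := by
              unfold mergeableB at hm
              cases h : (PySem.Str.endswith (PySem.Str.strip l) "." &&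
                (PySem.Str.isIn "\"" l || PySem.Str.isIn "'" l) &&
                PySem.Str.isIn "= f\"" l &&
                (PySem.Str.count l "\"" == 1) &&
                PySem.Str.endswith (PySem.Str.strip p) "\"") with
              | false => rfl
              | true => exact absurd h hm
            have hm' : mergeableB l p = false := by
              cases h : mergeableB l p with
              | false => rfl
              | true => exact absurd h hm
            simp only [fixLoopA, hcond, Bool.false_eq_true, if_false, hm']
            by_cases hl : l = ""
            · simp [hl]
            · simp only [ne_eq, hl, not_false_iff, if_true]
              rw [fixLoopA_acc (p :: u).length (p :: u) [l] le_rfl]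
              simp

-- ===== VERDICT (by name: the statement is the Claim_ definition above) =====
theorem fix_unterminated_strings_spec : Claim_equal_fix_unterminated_strings := by
  intro content _
  show fix_unterminated_strings content = fix_unterminated_strings_alt content
  unfold fix_unterminated_strings fix_unterminated_strings_alt
  rw [foldB_eq_fixLoopA]
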